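-- pv_equiv track=rewrite | github.com/Apologise/PythonTrain | 回文子串.py | func
-- ===== SOURCE A (Python) =====
-- def func(str, n):
-- 	liststr = list(str)
-- 	length = len(str)
-- 	if not str:
-- 		return False
-- 	if  length == 1:
-- 		return True
-- 	for i in range(0, length -n+1):
-- 		 temp = ''.join(liststr[i:n+i])
-- 		 temp_reverse = temp[::-1]
-- 		 if temp_reverse == temp:
-- 		 	return True
-- ===== SOURCE B (Python) =====
-- def func(str, n):
--     # expand-around-center: compute maximal palindrome radius per center, compare to n
--     L = len(str)
--     if L == 0:
--         return False
--     if L == 1: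
--         return True
--     if n <= 1:
--         return True
--     if n > L:
--         return None
--     h = n // 2
--     if n % 2:
--         for c in range(L):
--             r = 0
--             while c - r - 1 >= 0 and c + r + 1 < L and str[c - r - 1] == str[c + r + 1]:
--                 r += 1
--             if r >= h:
--                 return True
--     else:
--         for c in range(1, L):
--             r = 0
--             while c - r - 1 >= 0 and c + r < L and str[c - r - 1] == str[c + r]:
--                 r += 1
--             if r >= h:
--                 return True
--     return None
-- ===== Notes on version B (the rewrite author's own statement) =====
-- stated objective: alternative
-- what changed: A slides a length-n window over the string, materialising each window and its [::-1] reversal and comparing; B never builds substrings: it expands a maximal palindrome radius around each center (odd/even centers split by the parity of n) and tests whether any radius reaches n//2.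
import Mathlib
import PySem

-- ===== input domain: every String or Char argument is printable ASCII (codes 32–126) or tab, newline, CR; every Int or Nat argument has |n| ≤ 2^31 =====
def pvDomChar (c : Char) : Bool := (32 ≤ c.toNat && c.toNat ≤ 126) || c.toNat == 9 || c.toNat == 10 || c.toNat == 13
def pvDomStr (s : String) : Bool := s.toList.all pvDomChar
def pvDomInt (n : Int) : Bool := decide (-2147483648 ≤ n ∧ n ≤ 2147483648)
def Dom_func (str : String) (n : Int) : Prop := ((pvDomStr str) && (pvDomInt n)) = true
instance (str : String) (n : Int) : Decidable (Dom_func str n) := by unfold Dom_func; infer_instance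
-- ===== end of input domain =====

-- B replaces A's build-and-reverse sliding-window scan by an expand-around-center scan
-- (maximal palindrome radius per center, then a threshold test); objective: alternative algorithm.

-- ===== PORT A =====
-- the for-loop over range(0, length-n+1); ''.join of a list of chars compared with its
-- [::-1] reversal is exactly list equality with List.reverse (PySem.List.slice?_none_none_neg_one)
def funcLoopA (liststr : List Char) (n : Int) (i stop : Int) : Option Bool :=
  if h : i < stop then
    let temp := PySem.List.slice liststr (some i) (some (n + i))
    let temp_reverse := temp.reverse
    if temp_reverse = temp then some true else funcLoopA liststr n (i + 1) stop
  else none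
termination_by (stop - i).toNat
decreasing_by omega

def func (str : String) (n : Int) : Option Bool :=
  let liststr := str.toList
  let length : Int := (liststr.length : Int)
  if liststr = [] then some false
  else if length = 1 then some true
  else funcLoopA liststr n 0 (length - n + 1)

-- ===== PORT B =====
-- the inner `while` loops of Source B (expand radius r while the guard holds); fuel L bounds the
-- number of iterations (each successful step needs c + r + 1 < L resp. c + r < L, so r < L)
def expandO (s : List Char) (L c : Nat) : Nat → Nat → Nat
  | r, 0 => r
  | r, fuel+1 =>
    if r + 1 ≤ c ∧ c + r + 1 < L ∧ s[c - r - 1]? = s[c + r + 1]? then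
      expandO s L c (r + 1) fuel
    else r

def expandE (s : List Char) (L c : Nat) : Nat → Nat → Nat
  | r, 0 => r
  | r, fuel+1 =>
    if r + 1 ≤ c ∧ c + r < L ∧ s[c - r - 1]? = s[c + r]? then
      expandE s L c (r + 1) fuel
    else r

-- the two `for c in range(...)` loops of Source B
def scanO (s : List Char) (L h : Nat) : List Nat → Option Bool
  | [] => none
  | c :: rest => if h ≤ expandO s L c 0 L then some true else scanO s L h rest

def scanE (s : List Char) (L h : Nat) : List Nat → Option Bool
  | [] => none
  | c :: rest => if h ≤ expandE s L c 0 L then some true else scanE s L h rest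

def func_alt (str : String) (n : Int) : Option Bool :=
  let s := str.toList
  let L := s.length
  if L = 0 then some false
  else if L = 1 then some true
  else if n ≤ 1 then some true
  else if (L : Int) < n then none
  else
    let h := n.toNat / 2
    if n.toNat % 2 = 1 then scanO s L h (List.range L)
    else scanE s L h (List.range' 1 (L - 1))

-- ===== PRECONDITION & SPEC =====
def Spec_func (str : String) (n : Int) (out : Option Bool) : Prop := out = func_alt str n
instance (str : String) (n : Int) (out : Option Bool) : Decidable (Spec_func str n out) := by unfold Spec_func; infer_instance

-- ===== CLAIM (what is proved, stated in full; the proofs are below) =====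
def Claim_equal_func : Prop := ∀ (str : String) (n : Int), Dom_func str n → Spec_func str n (func str n)

-- ===== LEMMAS AND PROOFS =====

-- abbreviations used only by the proofs
def predA (s : List Char) (n : Int) (i : Int) : Prop :=
  (PySem.List.slice s (some i) (some (n + i))).reverse = PySem.List.slice s (some i) (some (n + i))

def Pal (s : List Char) (a len : Nat) : Prop :=
  ∀ j k, j + k + 1 = len → s[a + j]? = s[a + k]?

def okO (s : List Char) (L c k : Nat) : Prop := k ≤ c ∧ c + k < L ∧ s[c - k]? = s[c + k]?
def okE (s : List Char) (L c k : Nat) : Prop := k ≤ c ∧ c + k ≤ L ∧ s[c - k]? = s[c + k - 1]?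

theorem funcLoopA_eq (s : List Char) (n : Int) (i stop : Int) [DecidablePred (predA s n)] :
    funcLoopA s n i stop =
      if ∃ j ∈ PySem.List.pyRange i stop 1, predA s n j then some true else none := by
  fun_induction funcLoopA s n i stop with
  | case1 i h temp temp_reverse hp =>
    rw [PySem.List.pyRange_one_cons h, if_pos ⟨i, List.mem_cons_self, hp⟩]
  | case2 i h temp temp_reverse hp ih =>
    rw [ih, PySem.List.pyRange_one_cons h]
    by_cases hr : ∃ j ∈ PySem.List.pyRange (i + 1) stop 1, predA s n j
    · rw [if_pos hr, if_pos (by obtain ⟨j, hj, hpj⟩ := hr; exact ⟨j, List.mem_cons_of_mem _ hj, hpj⟩)]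
    · rw [if_neg hr, if_neg ?_]
      rintro ⟨j, hj, hpj⟩
      rcases List.mem_cons.mp hj with rfl | hj
      · exact hp hpj
      · exact hr ⟨j, hj, hpj⟩
  | case3 i h =>
    rw [PySem.List.pyRange_one_eq_nil (by omega), if_neg (by simp)]

theorem le_expandO (s : List Char) (L c : Nat) (r fuel : Nat) : r ≤ expandO s L c r fuel := by
  induction fuel generalizing r with
  | zero => simp [expandO]
  | succ fuel ih =>
    simp only [expandO]
    split
    · exact le_trans (Nat.le_succ r) (ih (r+1))
    · exact le_refl r

theorem le_expandE (s : List Char) (L c : Nat) (r fuel : Nat) : r ≤ expandE s L c r fuel := by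
  induction fuel generalizing r with
  | zero => simp [expandE]
  | succ fuel ih =>
    simp only [expandE]
    split
    · exact le_trans (Nat.le_succ r) (ih (r+1))
    · exact le_refl r

theorem expandO_ge_iff (s : List Char) (L c : Nat) (fuel r m : Nat) (hm : m ≤ fuel) :
    r + m ≤ expandO s L c r fuel ↔ ∀ k, r < k → k ≤ r + m → okO s L c k := by
  induction fuel generalizing r m with
  | zero =>
    interval_cases m
    simp [expandO]
    omega
  | succ fuel ih =>
    cases m with
    | zero =>
      constructor
      · intro _ k h1 h2; omega
      · intro _; simpa using le_expandO s L c r (fuel+1)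
    | succ m =>
      simp only [expandO]
      by_cases hg : r + 1 ≤ c ∧ c + r + 1 < L ∧ s[c - r - 1]? = s[c + r + 1]?
      · rw [if_pos hg]
        have hok : okO s L c (r+1) := by
          refine ⟨hg.1, by have := hg.2.1; omega, ?_⟩
          have h3 := hg.2.2
          have e1 : c - r - 1 = c - (r+1) := by omega
          have e2 : c + r + 1 = c + (r+1) := by omega
          rw [e1, e2] at h3
          exact h3
        rw [show r + (m+1) = (r+1) + m by omega, ih (r+1) m (by omega)]
        constructor
        · intro h k h1 h2
          by_cases hk : k = r + 1
          · rw [hk]; exact hok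
          · exact h k (by omega) (by omega)
        · intro h k h1 h2; exact h k (by omega) (by omega)
      · rw [if_neg hg]
        constructor
        · intro h; omega
        · intro h
          exfalso
          have hok := h (r+1) (by omega) (by omega)
          apply hg
          refine ⟨hok.1, by have := hok.2.1; omega, ?_⟩
          have h3 := hok.2.2
          have e1 : c - (r+1) = c - r - 1 := by omega
          have e2 : c + (r+1) = c + r + 1 := by omega
          rw [e1, e2] at h3
          exact h3

theorem expandE_ge_iff (s : List Char) (L c : Nat) (fuel r m : Nat) (hm : m ≤ fuel) :
    r + m ≤ expandE s L c r fuel ↔ ∀ k, r < k → k ≤ r + m → okE s L c k := by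
  induction fuel generalizing r m with
  | zero =>
    interval_cases m
    simp [expandE]
    omega
  | succ fuel ih =>
    cases m with
    | zero =>
      constructor
      · intro _ k h1 h2; omega
      · intro _; simpa using le_expandE s L c r (fuel+1)
    | succ m =>
      simp only [expandE]
      by_cases hg : r + 1 ≤ c ∧ c + r < L ∧ s[c - r - 1]? = s[c + r]?
      · rw [if_pos hg]
        have hok : okE s L c (r+1) := by
          refine ⟨hg.1, by have := hg.2.1; omega, ?_⟩
          have h3 := hg.2.2
          have e1 : c - r - 1 = c - (r+1) := by omega
          have e2 : c + r = c + (r+1) - 1 := by omega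
          rw [e1, e2] at h3
          exact h3
        rw [show r + (m+1) = (r+1) + m by omega, ih (r+1) m (by omega)]
        constructor
        · intro h k h1 h2
          by_cases hk : k = r + 1
          · rw [hk]; exact hok
          · exact h k (by omega) (by omega)
        · intro h k h1 h2; exact h k (by omega) (by omega)
      · rw [if_neg hg]
        constructor
        · intro h; omega
        · intro h
          exfalso
          have hok := h (r+1) (by omega) (by omega)
          apply hg
          refine ⟨hok.1, by have := hok.2.1; omega, ?_⟩
          have h3 := hok.2.2
          have e1 : c - (r+1) = c - r - 1 := by omega
          have e2 : c + (r+1) - 1 = c + r := by omega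
          rw [e1, e2] at h3
          exact h3

theorem scanO_eq (s : List Char) (L h : Nat) (cs : List Nat) :
    scanO s L h cs = if ∃ c ∈ cs, h ≤ expandO s L c 0 L then some true else none := by
  induction cs with
  | nil => simp [scanO]
  | cons c rest ih =>
    simp only [scanO, List.exists_mem_cons_iff]
    by_cases hc : h ≤ expandO s L c 0 L
    · rw [if_pos hc, if_pos (Or.inl hc)]
    · rw [if_neg hc, ih]
      by_cases hr : ∃ c' ∈ rest, h ≤ expandO s L c' 0 L
      · rw [if_pos hr, if_pos (Or.inr hr)]
      · rw [if_neg hr, if_neg (by rintro (h | h) <;> [exact hc h; exact hr h])]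

theorem scanE_eq (s : List Char) (L h : Nat) (cs : List Nat) :
    scanE s L h cs = if ∃ c ∈ cs, h ≤ expandE s L c 0 L then some true else none := by
  induction cs with
  | nil => simp [scanE]
  | cons c rest ih =>
    simp only [scanE, List.exists_mem_cons_iff]
    by_cases hc : h ≤ expandE s L c 0 L
    · rw [if_pos hc, if_pos (Or.inl hc)]
    · rw [if_neg hc, ih]
      by_cases hr : ∃ c' ∈ rest, h ≤ expandE s L c' 0 L
      · rw [if_pos hr, if_pos (Or.inr hr)]
      · rw [if_neg hr, if_neg (by rintro (h | h) <;> [exact hc h; exact hr h])]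

-- a list equals its reverse iff symmetric positions agree
theorem reverse_eq_self_iff (w : List Char) :
    w.reverse = w ↔ ∀ j k, j + k + 1 = w.length → w[j]? = w[k]? := by
  constructor
  · intro hrev j k hjk
    have hj : j < w.length := by omega
    calc w[j]? = w.reverse[j]? := by rw [hrev]
      _ = w[w.length - 1 - j]? := List.getElem?_reverse hj
      _ = w[k]? := by congr 1; omega
  · intro h
    apply List.ext_getElem?_iff.mpr
    intro i
    by_cases hi : i < w.length
    · calc w.reverse[i]? = w[w.length - 1 - i]? := List.getElem?_reverse hi
        _ = w[i]? := h (w.length - 1 - i) i (by omega)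
    · have h1 : w.reverse[i]? = none := List.getElem?_eq_none (by simp; omega)
      have h2 : w[i]? = none := List.getElem?_eq_none (by omega)
      rw [h1, h2]

-- the window s[a : a+len] is a palindrome iff Pal s a len
theorem window_pal_iff (s : List Char) (a len : Nat) (hlen : a + len ≤ s.length) :
    ((s.drop a).take len).reverse = (s.drop a).take len ↔ Pal s a len := by
  have hw : ((s.drop a).take len).length = len := by simp; omega
  have key : ∀ j, j < len → ((s.drop a).take len)[j]? = s[a + j]? := by
    intro j hj
    rw [List.getElem?_take_of_lt hj, List.getElem?_drop]
  rw [reverse_eq_self_iff, hw]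
  unfold Pal
  constructor
  · intro h j k hjk
    rw [← key j (by omega), ← key k (by omega)]
    exact h j k hjk
  · intro h j k hjk
    rw [key j (by omega), key k (by omega)]
    exact h j k hjk

theorem predA_iff (s : List Char) (n i : Int) (h0 : 0 ≤ i) (h2 : 0 ≤ n)
    (hL : i.toNat + n.toNat ≤ s.length) :
    predA s n i ↔ Pal s i.toNat n.toNat := by
  unfold predA
  rw [PySem.List.slice_toNat s h0 (by omega)]
  have e : (n + i).toNat - i.toNat = n.toNat := by omega
  rw [e]
  exact window_pal_iff s i.toNat n.toNat hL

-- odd length n = 2h+1: a palindromic window exists iff some center expands to radius ≥ h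
theorem odd_center_iff (s : List Char) (L h : Nat) (h1 : 1 ≤ h) :
    (∃ c < L, ∀ k, 1 ≤ k → k ≤ h → okO s L c k) ↔
      (∃ a, a + (2 * h + 1) ≤ L ∧ Pal s a (2 * h + 1)) := by
  constructor
  · rintro ⟨c, hcL, hok⟩
    obtain ⟨hhc, hhL, -⟩ := hok h h1 le_rfl
    refine ⟨c - h, by omega, ?_⟩
    intro j k hjk
    rcases lt_trichotomy j h with hj | hj | hj
    · have hd := hok (h - j) (by omega) (by omega)
      have e1 : c - h + j = c - (h - j) := by omega
      have e2 : c - h + k = c + (h - j) := by omega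
      rw [e1, e2]; exact hd.2.2
    · have hk : j = k := by omega
      rw [hk]
    · have hd := hok (j - h) (by omega) (by omega)
      have e1 : c - h + j = c + (j - h) := by omega
      have e2 : c - h + k = c - (j - h) := by omega
      rw [e1, e2]; exact hd.2.2.symm
  · rintro ⟨a, haL, hpal⟩
    refine ⟨a + h, by omega, ?_⟩
    intro k h1k hkh
    refine ⟨by omega, by omega, ?_⟩
    have e1 : a + h - k = a + (h - k) := by omega
    have e2 : a + h + k = a + (h + k) := by omega
    rw [e1, e2]
    exact hpal (h - k) (h + k) (by omega)

-- even length n = 2h: a palindromic window exists iff some center expands to radius ≥ h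
theorem even_center_iff (s : List Char) (L h : Nat) (h1 : 1 ≤ h) :
    (∃ c, 1 ≤ c ∧ c < L ∧ ∀ k, 1 ≤ k → k ≤ h → okE s L c k) ↔
      (∃ a, a + 2 * h ≤ L ∧ Pal s a (2 * h)) := by
  constructor
  · rintro ⟨c, h1c, hcL, hok⟩
    obtain ⟨hhc, hhL, -⟩ := hok h h1 le_rfl
    refine ⟨c - h, by omega, ?_⟩
    intro j k hjk
    rcases lt_trichotomy j k with hj | hj | hj
    · have hd := hok (h - j) (by omega) (by omega)
      have e1 : c - h + j = c - (h - j) := by omega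
      have e2 : c - h + k = c + (h - j) - 1 := by omega
      rw [e1, e2]; exact hd.2.2
    · omega
    · have hd := hok (h - k) (by omega) (by omega)
      have e1 : c - h + j = c + (h - k) - 1 := by omega
      have e2 : c - h + k = c - (h - k) := by omega
      rw [e1, e2]; exact hd.2.2.symm
  · rintro ⟨a, haL, hpal⟩
    refine ⟨a + h, by omega, by omega, ?_⟩
    intro k h1k hkh
    refine ⟨by omega, by omega, ?_⟩
    have e1 : a + h - k = a + (h - k) := by omega
    have e2 : a + h + k - 1 = a + (h + k - 1) := by omega
    rw [e1, e2]
    exact hpal (h - k) (h + k - 1) (by omega)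

-- ===== VERDICT (by name: the statement is the Claim_ definition above) =====
theorem func_spec : Claim_equal_func := by
  intro str n _
  simp only [Spec_func, func, func_alt]
  generalize str.toList = s
  haveI : DecidablePred (predA s n) := fun i => by unfold predA; infer_instance
  by_cases h0 : s = []
  · rw [if_pos h0, if_pos (by rw [h0]; rfl)]
  · have hL1 : 0 < s.length := List.length_pos_iff.mpr h0
    rw [if_neg h0, if_neg (show ¬ s.length = 0 by omega)]
    by_cases h1 : s.length = 1
    · rw [if_pos (show ((s.length : Int)) = 1 by exact_mod_cast h1), if_pos h1]
    · have hA1 : ¬ ((s.length : Int) = 1) := by exact_mod_cast h1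
      rw [if_neg hA1, if_neg h1]
      have hL2 : 2 ≤ s.length := by omega
      by_cases hn1 : n ≤ 1
      · rw [if_pos hn1, funcLoopA_eq, if_pos ?_]
        refine ⟨1 - n, ?_, ?_⟩
        · rw [PySem.List.mem_pyRange_one]; omega
        · unfold predA
          have e : n + (1 - n) = 1 := by ring
          rw [e, PySem.List.slice_toNat s (by omega) (by omega)]
          by_cases hn : n = 1
          · subst hn
            norm_num
            cases s with
            | nil => exact absurd rfl h0
            | cons c t => simp
          · have e2 : (1 : Int).toNat - ((1 : Int) - n).toNat = 0 := by omega
            rw [e2]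
            simp
      · rw [if_neg hn1]
        by_cases hnL : (s.length : Int) < n
        · rw [if_pos hnL, funcLoopA_eq, PySem.List.pyRange_one_eq_nil (by omega),
            if_neg (by simp)]
        · rw [if_neg hnL, funcLoopA_eq]
          have hn2 : 2 ≤ n := by omega
          have hn'2 : 2 ≤ n.toNat := by omega
          have hn'L : n.toNat ≤ s.length := by omega
          have hEA : (∃ i ∈ PySem.List.pyRange 0 ((s.length : Int) - n + 1) 1, predA s n i) ↔
              ∃ a, a + n.toNat ≤ s.length ∧ Pal s a n.toNat := by
            constructor
            · rintro ⟨i, hmem, hp⟩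
              rw [PySem.List.mem_pyRange_one] at hmem
              refine ⟨i.toNat, by omega, ?_⟩
              exact (predA_iff s n i hmem.1 (by omega) (by omega)).mp hp
            · rintro ⟨a, ha, hp⟩
              refine ⟨(a : Int), ?_, ?_⟩
              · rw [PySem.List.mem_pyRange_one]; omega
              · refine (predA_iff s n (a : Int) (by omega) (by omega) (by omega)).mpr ?_
                rw [Int.toNat_natCast]
                exact hp
          by_cases hpar : n.toNat % 2 = 1
          · rw [if_pos hpar, scanO_eq]
            refine if_congr ?_ rfl rfl
            generalize hq : n.toNat / 2 = q
            have hodd : n.toNat = 2 * q + 1 := by omega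
            have hh1 : 1 ≤ q := by omega
            have hB : ∀ c, (q ≤ expandO s s.length c 0 s.length) ↔
                ∀ k, 1 ≤ k → k ≤ q → okO s s.length c k := by
              intro c
              have := expandO_ge_iff s s.length c s.length 0 q (by omega)
              simpa using this
            refine hEA.trans (Iff.symm ?_)
            rw [hodd]
            have hcent := odd_center_iff s s.length q hh1
            simpa only [List.mem_range, exists_prop, hB] using hcent
          · rw [if_neg hpar, scanE_eq]
            refine if_congr ?_ rfl rfl
            generalize hq : n.toNat / 2 = q
            have heven : n.toNat = 2 * q := by omega
            have hh1 : 1 ≤ q := by omega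
            have hB : ∀ c, (q ≤ expandE s s.length c 0 s.length) ↔
                ∀ k, 1 ≤ k → k ≤ q → okE s s.length c k := by
              intro c
              have := expandE_ge_iff s s.length c s.length 0 q (by omega)
              simpa using this
            refine hEA.trans (Iff.symm ?_)
            have hcent := even_center_iff s s.length q hh1
            have hr : ∀ c : Nat, c ∈ List.range' 1 (s.length - 1) ↔ 1 ≤ c ∧ c < s.length := by
              intro c
              rw [List.mem_range'_1]
              omega
            rw [heven]
            simpa only [hr, exists_prop, hB, and_assoc] using hcent
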